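-- pv_equiv track=rewrite | github.com/emiraydin10/SENG315-HW3 | filters/transform.py | transform
-- ===== SOURCE A (Python) =====
-- def transform(tokens):
--     transformed = []
--     modified = []
--     removed = []
--
--     for token in tokens:
--
--         new_token = token.lower()
--
--         if len(new_token) < 3:
--             removed.append((token, "length < 3"))
--             continue
--
--         if new_token != token:
--             modified.append((token, new_token))
--
--         transformed.append(new_token)
--
--     return transformed, modified, removed
-- ===== SOURCE B (Python) =====
-- def transform(tokens):
--     tokens = list(tokens)
--     transformed = [t.lower() for t in tokens if len(t.lower()) >= 3]
--     modified = [(t, t.lower()) for t in tokens if len(t.lower()) >= 3 and t.lower() != t]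
--     removed = [(t, "length < 3") for t in tokens if len(t.lower()) < 3]
--     return transformed, modified, removed
-- ===== Notes on version B (the rewrite author's own statement) =====
-- stated objective: alternative
-- what changed: Replaces the single interleaved loop with three mutable accumulators by three independent order-preserving passes (one comprehension per output list).
import Mathlib
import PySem

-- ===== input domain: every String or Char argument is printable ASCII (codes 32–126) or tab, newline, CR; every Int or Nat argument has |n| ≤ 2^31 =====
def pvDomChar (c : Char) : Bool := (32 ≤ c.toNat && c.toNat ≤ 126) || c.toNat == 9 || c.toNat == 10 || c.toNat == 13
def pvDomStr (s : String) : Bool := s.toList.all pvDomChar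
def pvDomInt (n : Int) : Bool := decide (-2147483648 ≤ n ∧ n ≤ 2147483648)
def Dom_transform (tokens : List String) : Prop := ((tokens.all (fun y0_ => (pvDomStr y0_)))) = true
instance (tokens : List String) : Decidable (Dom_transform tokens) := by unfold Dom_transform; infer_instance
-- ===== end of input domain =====

-- B builds the three result lists in three independent passes instead of A's one interleaved loop (alternative decomposition, same cost).


-- ===== PORT A =====
def transform (tokens : List String) : List String × (List (String × String)) × (List (String × String)) :=
  tokens.foldl
    (fun acc token =>
      let newToken := PySem.Str.lower token
      if PySem.Str.len newToken < 3 then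
        (acc.1, acc.2.1, acc.2.2 ++ [(token, "length < 3")])
      else if newToken != token then
        (acc.1 ++ [newToken], acc.2.1 ++ [(token, newToken)], acc.2.2)
      else
        (acc.1 ++ [newToken], acc.2.1, acc.2.2))
    ([], [], [])

-- ===== PORT B =====
def transform_alt (tokens : List String) : List String × (List (String × String)) × (List (String × String)) :=
  (tokens.filterMap (fun t =>
      if PySem.Str.len (PySem.Str.lower t) ≥ 3 then some (PySem.Str.lower t) else none),
   tokens.filterMap (fun t =>
      if PySem.Str.len (PySem.Str.lower t) ≥ 3 ∧ PySem.Str.lower t ≠ t then some (t, PySem.Str.lower t) else none),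
   tokens.filterMap (fun t =>
      if PySem.Str.len (PySem.Str.lower t) < 3 then some (t, "length < 3") else none))

-- ===== PRECONDITION & SPEC =====
def Spec_transform (tokens : List String) (out : List String × (List (String × String)) × (List (String × String))) : Prop := out = transform_alt tokens
instance (tokens : List String) (out : List String × (List (String × String)) × (List (String × String))) : Decidable (Spec_transform tokens out) := by unfold Spec_transform; infer_instance

-- ===== CLAIM (what is proved, stated in full; the proofs are below) =====
def Claim_equal_transform : Prop := ∀ (tokens : List String), Dom_transform tokens → Spec_transform tokens (transform tokens)

-- ===== LEMMAS AND PROOFS =====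

theorem transform_foldl (tokens : List String)
    (acc : List String × (List (String × String)) × (List (String × String))) :
    tokens.foldl
      (fun acc token =>
        let newToken := PySem.Str.lower token
        if PySem.Str.len newToken < 3 then
          (acc.1, acc.2.1, acc.2.2 ++ [(token, "length < 3")])
        else if newToken != token then
          (acc.1 ++ [newToken], acc.2.1 ++ [(token, newToken)], acc.2.2)
        else
          (acc.1 ++ [newToken], acc.2.1, acc.2.2))
      acc
    = (acc.1 ++ (transform_alt tokens).1, acc.2.1 ++ (transform_alt tokens).2.1,
       acc.2.2 ++ (transform_alt tokens).2.2) := by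
  induction tokens generalizing acc with
  | nil => simp [transform_alt]
  | cons t ts ih =>
    rw [List.foldl_cons, ih]
    by_cases h1 : (PySem.Chars.lower t.toList).length < 3
    · have h2 : ¬ 3 ≤ (PySem.Chars.lower t.toList).length := by omega
      simp [transform_alt, PySem.Str.len, PySem.Str.toList_lower, h1, h2]
    · have h2 : 3 ≤ (PySem.Chars.lower t.toList).length := by omega
      by_cases h3 : PySem.Str.lower t = t
      · have h4 : t.length = (PySem.Chars.lower t.toList).length := by
          conv_lhs => rw [← h3]
          simp [String.length, PySem.Str.toList_lower]
        have h5 : ¬ t.length < 3 := by omega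
        simp [transform_alt, PySem.Str.len, PySem.Str.toList_lower, h1, h2, h3, h5]
      · simp [transform_alt, PySem.Str.len, PySem.Str.toList_lower, h1, h2, h3, bne]

-- ===== VERDICT (by name: the statement is the Claim_ definition above) =====
theorem transform_spec : Claim_equal_transform := by
  intro tokens _
  unfold Spec_transform transform
  rw [transform_foldl]
  simp
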